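-- pv_equiv track=rewrite | github.com/intel/neural-compressor | neural_compressor/adaptor/torch_utils/block.py | merge_with_cap
-- ===== SOURCE A (Python) =====
-- def merge_with_cap(block_lst, cap):
--     """Filter ops according to capability.
--     step1, filter ops
--     step2, assign op type
--
--     Args:
--         block_lst: _description_
--         cap: _description_
--     """
--     cap_ops = cap.get('op_wise', {})
--     ops_info = cap_ops.keys()
--     filter_result = []
--     for block in block_lst:
--         op_info_lst = [pair for pair in ops_info if pair[0] in block]
--         filter_result.append(op_info_lst)
--     return filter_result
-- ===== SOURCE B (Python) =====
-- def merge_with_cap(block_lst, cap):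
--     """Filter ops according to capability (inverted-index formulation)."""
--     ops_info = cap.get('op_wise', {}).keys()
--     index = {}
--     for i, block in enumerate(block_lst):
--         for name in dict.fromkeys(block):
--             index.setdefault(name, []).append(i)
--     filter_result = [[] for _ in block_lst]
--     for pair in ops_info:
--         for i in index.get(pair[0], ()):
--             filter_result[i].append(pair)
--     return filter_result
-- ===== Notes on version B (the rewrite author's own statement) =====
-- stated objective: alternative
-- what changed: Replaces the per-block scan over all op pairs with an inverted index (op-name -> list of block indices) built once from the blocks, then a single pass over ops_info that appends each pair to every matching block's result list.
import Mathlib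
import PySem

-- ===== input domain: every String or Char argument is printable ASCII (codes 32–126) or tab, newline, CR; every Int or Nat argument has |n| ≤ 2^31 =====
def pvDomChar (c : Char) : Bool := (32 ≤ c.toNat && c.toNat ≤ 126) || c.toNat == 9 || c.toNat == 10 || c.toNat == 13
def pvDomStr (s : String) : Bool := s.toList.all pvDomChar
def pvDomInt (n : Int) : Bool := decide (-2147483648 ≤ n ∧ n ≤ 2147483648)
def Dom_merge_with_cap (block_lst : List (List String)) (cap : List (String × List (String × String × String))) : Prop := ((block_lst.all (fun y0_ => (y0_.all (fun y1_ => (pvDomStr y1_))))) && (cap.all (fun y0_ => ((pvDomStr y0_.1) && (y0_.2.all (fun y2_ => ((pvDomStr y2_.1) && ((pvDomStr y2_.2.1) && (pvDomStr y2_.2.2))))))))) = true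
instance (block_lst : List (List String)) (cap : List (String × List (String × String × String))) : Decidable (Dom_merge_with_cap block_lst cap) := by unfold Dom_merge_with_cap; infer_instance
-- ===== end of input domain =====

-- B replaces A's per-block scan of all op pairs by an inverted index (op-name -> block indices)
-- built once, then a single pass over ops_info; objective: alternative (same result, different algorithm).


-- ===== PORT A =====
-- cap : dict[str, dict[tuple[str,str], str]]; an inner-dict entry (a,b,v) encodes key (a,b), value v.
-- shared by both ports only as input decoding: ops_info = list(cap.get('op_wise', {}).keys())
def mwcOpsInfo (cap : List (String × List (String × String × String))) : List (String × String) :=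
  (PySem.Dict.ofList ((((PySem.Dict.ofList cap).getD "op_wise" []).map (fun e => ((e.1, e.2.1), e.2.2))))).keys

def merge_with_cap (block_lst : List (List String)) (cap : List (String × List (String × String × String))) : List (List (String × String)) :=
  let ops_info := mwcOpsInfo cap
  block_lst.foldl (fun filter_result block =>
    filter_result ++ [ops_info.filter (fun pair => block.contains pair.1)]) []

-- ===== PORT B =====
-- index building: 'for i, block in enumerate(block_lst): for name in dict.fromkeys(block): index.setdefault(name, []).append(i)'
def mwcBuildIdx : List (List String) → Nat → PySem.Dict String (List Nat) → PySem.Dict String (List Nat)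
  | [], _, index => index
  | block :: rest, i, index =>
      mwcBuildIdx rest (i + 1)
        ((PySem.List.dedup block).foldl (fun index name => index.modify name [] (fun l => l ++ [i])) index)

def merge_with_cap_alt (block_lst : List (List String)) (cap : List (String × List (String × String × String))) : List (List (String × String)) :=
  let ops_info := mwcOpsInfo cap
  let index := mwcBuildIdx block_lst 0 PySem.Dict.empty
  let init : List (List (String × String)) := block_lst.map (fun _ => [])
  ops_info.foldl (fun filter_result pair =>
    (index.getD pair.1 []).foldl (fun filter_result i =>
      filter_result.set i (filter_result.getD i [] ++ [pair])) filter_result) init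

-- ===== PRECONDITION & SPEC =====
def Spec_merge_with_cap (block_lst : List (List String)) (cap : List (String × List (String × String × String))) (out : List (List (String × String))) : Prop := out = merge_with_cap_alt block_lst cap
instance (block_lst : List (List String)) (cap : List (String × List (String × String × String))) (out : List (List (String × String))) : Decidable (Spec_merge_with_cap block_lst cap out) := by unfold Spec_merge_with_cap; infer_instance

-- ===== CLAIM (what is proved, stated in full; the proofs are below) =====
def Claim_equal_merge_with_cap : Prop := ∀ (block_lst : List (List String)) (cap : List (String × List (String × String × String))), Dom_merge_with_cap block_lst cap → Spec_merge_with_cap block_lst cap (merge_with_cap block_lst cap)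

-- ===== LEMMAS AND PROOFS =====

-- the reference value of index[name]: block indices (offset s) whose block contains name, increasing
def mwcIdxSpec (name : String) : List (List String) → Nat → List Nat
  | [], _ => []
  | b :: bs, s => (if name ∈ b then [s] else []) ++ mwcIdxSpec name bs (s + 1)

theorem mwc_inner_getD (L : List String) (hL : L.Nodup) (i : Nat)
    (d : PySem.Dict String (List Nat)) (name : String) :
    ((L.foldl (fun d n => d.modify n [] (fun l => l ++ [i])) d).getD name [])
      = d.getD name [] ++ (if name ∈ L then [i] else []) := by
  induction L generalizing d with
  | nil => simp
  | cons n L ih =>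
      simp only [List.foldl_cons]
      rw [ih (by exact hL.of_cons)]
      by_cases hn : name = n
      · subst hn
        have hnot : name ∉ L := (List.nodup_cons.mp hL).1
        simp [hnot, PySem.Dict.getD_modify_self]
      · by_cases hm : name ∈ L <;>
          simp [PySem.Dict.getD_modify_of_ne _ _ _ hn, hn, hm]

theorem mwc_buildIdx_getD (bs : List (List String)) (s : Nat)
    (d : PySem.Dict String (List Nat)) (name : String) :
    (mwcBuildIdx bs s d).getD name [] = d.getD name [] ++ mwcIdxSpec name bs s := by
  induction bs generalizing s d with
  | nil => simp [mwcBuildIdx, mwcIdxSpec]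
  | cons b bs ih =>
      simp only [mwcBuildIdx, mwcIdxSpec]
      rw [ih, mwc_inner_getD _ (PySem.List.nodup_dedup b) s d name]
      simp [List.append_assoc]

theorem mwc_mem_idxSpec (name : String) (bs : List (List String)) (s j : Nat) :
    j ∈ mwcIdxSpec name bs s ↔ s ≤ j ∧ j - s < bs.length ∧ name ∈ bs.getD (j - s) [] := by
  induction bs generalizing s with
  | nil => simp [mwcIdxSpec]
  | cons b bs ih =>
      simp only [mwcIdxSpec, List.mem_append, ih]
      constructor
      · rintro (h | ⟨h1, h2, h3⟩)
        · rcases (by split at h <;> simp_all : j = s ∧ name ∈ b) with ⟨rfl, hb⟩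
          simpa using hb
        · refine ⟨by omega, by simp; omega, ?_⟩
          have : j - s = (j - (s+1)) + 1 := by omega
          simpa [this] using h3
      · rintro ⟨h1, h2, h3⟩
        rcases Nat.eq_or_lt_of_le h1 with rfl | hlt
        · left; simpa using h3
        · right
          refine ⟨by omega, by simp at h2 ⊢; omega, ?_⟩
          have : j - s = (j - (s+1)) + 1 := by omega
          rw [this] at h3; simpa using h3

theorem mwc_idxSpec_pairwise (name : String) (bs : List (List String)) (s : Nat) :
    (mwcIdxSpec name bs s).Pairwise (· < ·) := by
  induction bs generalizing s with
  | nil => simp [mwcIdxSpec]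
  | cons b bs ih =>
      simp only [mwcIdxSpec]
      rw [List.pairwise_append]
      refine ⟨by split <;> simp, ih (s+1), ?_⟩
      intro a ha c hc
      have ha' : a = s := by split at ha <;> simp_all
      have := (mwc_mem_idxSpec name bs (s+1) c).mp hc
      omega

theorem mwc_idxSpec_nodup (name : String) (bs : List (List String)) (s : Nat) :
    (mwcIdxSpec name bs s).Nodup :=
  (mwc_idxSpec_pairwise name bs s).imp (fun h => Nat.ne_of_lt h)

theorem mwc_setfold_length (S : List Nat) (pair : String × String)
    (fr : List (List (String × String))) :
    (S.foldl (fun fr i => fr.set i (fr.getD i [] ++ [pair])) fr).length = fr.length := by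
  induction S generalizing fr with
  | nil => rfl
  | cons i S ih =>
      simp only [List.foldl_cons]
      rw [ih]
      simp

theorem mwc_setfold_getElem? (S : List Nat) (pair : String × String)
    (fr : List (List (String × String))) (hS : S.Nodup) (hb : ∀ i ∈ S, i < fr.length) (j : Nat) :
    (S.foldl (fun fr i => fr.set i (fr.getD i [] ++ [pair])) fr)[j]?
      = fr[j]?.map (fun x => x ++ if j ∈ S then [pair] else []) := by
  induction S generalizing fr with
  | nil =>
      simp
  | cons i S ih =>
      simp only [List.foldl_cons]
      have hi : i < fr.length := hb i (by simp)
      rw [ih _ hS.of_cons (by intro k hk; simpa using hb k (by simp [hk]))]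
      by_cases hji : j = i
      · subst hji
        have hnot : j ∉ S := (List.nodup_cons.mp hS).1
        have : fr.getD j [] = fr[j] := List.getD_eq_getElem fr [] hi
        simp [hi, hnot]
      · simp [List.getElem?_set_ne (fun h => hji h.symm), hji]

theorem mwc_opsfold_getElem? (ops : List (String × String))
    (idx : PySem.Dict String (List Nat)) (fr : List (List (String × String)))
    (hnd : ∀ name, (idx.getD name []).Nodup)
    (hb : ∀ name, ∀ i ∈ idx.getD name [], i < fr.length) (j : Nat) :
    (ops.foldl (fun fr pair =>
        (idx.getD pair.1 []).foldl (fun fr i => fr.set i (fr.getD i [] ++ [pair])) fr) fr)[j]?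
      = fr[j]?.map (fun x => x ++ ops.filter (fun p => decide (j ∈ idx.getD p.1 []))) := by
  induction ops generalizing fr with
  | nil =>
      simp
  | cons p ops ih =>
      simp only [List.foldl_cons]
      set fr' := (idx.getD p.1 []).foldl (fun fr i => fr.set i (fr.getD i [] ++ [p])) fr with hfr'
      have hlen : fr'.length = fr.length := mwc_setfold_length _ _ _
      rw [ih fr' (by intro name i hi; rw [hlen]; exact hb name i hi)]
      rw [hfr', mwc_setfold_getElem? _ _ _ (hnd p.1) (hb p.1) j]
      rw [Option.map_map]
      rcases fr[j]? with _ | x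
      · rfl
      · simp only [Option.map_some, Function.comp_apply, List.filter_cons]
        by_cases hj : j ∈ idx.getD p.1 [] <;> simp [hj]

theorem mwc_foldl_append_singleton (bs : List (List String))
    (f : List String → List (String × String)) (acc : List (List (String × String))) :
    bs.foldl (fun acc b => acc ++ [f b]) acc = acc ++ bs.map f := by
  induction bs generalizing acc with
  | nil => simp
  | cons b bs ih => simp [ih]

theorem mwc_getD_empty (name : String) :
    (PySem.Dict.empty : PySem.Dict String (List Nat)).getD name [] = [] := rfl

-- ===== VERDICT (by name: the statement is the Claim_ definition above) =====
theorem merge_with_cap_spec : Claim_equal_merge_with_cap := by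
  intro block_lst cap _
  unfold Spec_merge_with_cap merge_with_cap merge_with_cap_alt
  set ops := mwcOpsInfo cap with hops
  set idx := mwcBuildIdx block_lst 0 PySem.Dict.empty with hidx
  have hgetD : ∀ name, idx.getD name [] = mwcIdxSpec name block_lst 0 := by
    intro name
    rw [hidx, mwc_buildIdx_getD, mwc_getD_empty]
    simp
  have hnd : ∀ name, (idx.getD name []).Nodup := by
    intro name; rw [hgetD]; exact mwc_idxSpec_nodup name block_lst 0
  have hb : ∀ name, ∀ i ∈ idx.getD name [],
      i < (block_lst.map (fun _ => ([] : List (String × String)))).length := by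
    intro name i hi
    rw [hgetD] at hi
    have := (mwc_mem_idxSpec name block_lst 0 i).mp hi
    simp; omega
  rw [mwc_foldl_append_singleton]
  apply List.ext_getElem?
  intro j
  rw [mwc_opsfold_getElem? ops idx _ hnd hb j]
  simp only [List.nil_append, List.getElem?_map]
  rcases hj : block_lst[j]? with _ | block
  · rfl
  · obtain ⟨hjlt, hblk⟩ := List.getElem?_eq_some_iff.mp hj
    simp only [Option.map_some, List.nil_append]
    congr 1
    apply List.filter_congr
    intro p _
    simp [hgetD p.1, mwc_mem_idxSpec, hjlt, hblk]
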